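-- pv_equiv track=rewrite | github.com/222-del/Morphotenariss-Choenbergi | main.py | solution
-- ===== SOURCE A (Python) =====
-- def func(nums):
--     max = 1
--     for i in range(len(nums)):
--         nmax = 1
--         c = nums[i]
--         for j in range(len(nums) - i):
--             if (c == nums[j + i]):
--                 nmax += 1
--         if (nmax > max):
--             max = nmax
--     return max
--
-- def solution(nums):
--     max = func(nums)
--     min = len(nums)
--     tmin = min
--     for i in range(len(nums)):
--         t = nums[0:i + 1]
--         if (func(t) == max):
--             tmin = len(t)
--     if (tmin < min):
--         min = tmin
--     for i in range(len(nums)):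
--         t = nums[-i:]
--         if (func(t) == max):
--             tmin = len(t)
--     if (tmin < min):
--         min = tmin
--     return (min)
-- ===== SOURCE B (Python) =====
-- def solution(nums):
--     n = len(nums)
--     if n == 0:
--         return 0
--     freq = {}
--     for x in nums:
--         freq[x] = freq.get(x, 0) + 1
--     m = max(freq.values())
--     freq[nums[0]] -= 1
--     return n - 1 if max(freq.values()) == m else n
-- ===== Notes on version B (the rewrite author's own statement) =====
-- stated objective: faster
-- what changed: Replaced the O(n^3) nested rescans (max element frequency recomputed for every prefix and suffix) by one frequency-dict pass: the loops' net effect is just comparing the max frequency of the whole list with that of its tail, which B reads off the counter after decrementing the first element's count.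
import Mathlib
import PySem

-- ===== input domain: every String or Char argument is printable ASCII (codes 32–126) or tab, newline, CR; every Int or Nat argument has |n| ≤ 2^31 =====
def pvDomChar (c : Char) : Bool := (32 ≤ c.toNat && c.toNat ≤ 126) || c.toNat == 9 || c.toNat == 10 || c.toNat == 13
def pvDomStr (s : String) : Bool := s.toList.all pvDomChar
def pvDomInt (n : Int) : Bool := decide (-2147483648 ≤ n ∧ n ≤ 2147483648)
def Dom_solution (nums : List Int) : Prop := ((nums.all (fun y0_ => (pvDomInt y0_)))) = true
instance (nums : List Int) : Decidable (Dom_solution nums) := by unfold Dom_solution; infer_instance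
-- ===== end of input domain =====

-- B replaces A's repeated rescans of every prefix and suffix by one frequency-dict pass (objective: faster).

-- ===== PORT A =====
def func (nums : List Int) : Int :=
  (PySem.List.pyRange 0 (nums.length : Int)).foldl (fun mx i =>
    let c := PySem.List.pyGetD nums i 0
    let nmax := (PySem.List.pyRange 0 ((nums.length : Int) - i)).foldl
      (fun nm j => if c == PySem.List.pyGetD nums (j + i) 0 then nm + 1 else nm) 1
    if nmax > mx then nmax else mx) 1

def solution (nums : List Int) : Int :=
  let mx := func nums
  let mn : Int := (nums.length : Int)
  let tmin1 := (PySem.List.pyRange 0 (nums.length : Int)).foldl (fun tmin i =>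
      let t := PySem.List.slice nums (some 0) (some (i + 1))
      if func t == mx then (t.length : Int) else tmin) mn
  let mn1 := if tmin1 < mn then tmin1 else mn
  let tmin2 := (PySem.List.pyRange 0 (nums.length : Int)).foldl (fun tmin i =>
      let t := PySem.List.slice nums (some (-i)) none
      if func t == mx then (t.length : Int) else tmin) tmin1
  if tmin2 < mn1 then tmin2 else mn1

-- ===== PORT B =====
def solution_alt (nums : List Int) : Int :=
  if nums.length = 0 then 0 else
  let freq := nums.foldl (fun d x => d.insert x (d.getD x 0 + 1)) (PySem.Dict.empty : PySem.Dict Int Int)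
  let m := (PySem.List.max? freq.values (fun v => v)).getD 0   -- max() on a nonempty list; the getD never fires
  let h0 := PySem.List.pyGetD nums 0 0
  let freq2 := freq.insert h0 (freq.getD h0 0 - 1)             -- the first element is always a key
  if (PySem.List.max? freq2.values (fun v => v)).getD 0 == m
  then (nums.length : Int) - 1 else (nums.length : Int)

-- ===== PRECONDITION & SPEC =====
def Spec_solution (nums : List Int) (out : Int) : Prop := out = solution_alt nums
instance (nums : List Int) (out : Int) : Decidable (Spec_solution nums out) := by unfold Spec_solution; infer_instance

-- ===== CLAIM (what is proved, stated in full; the proofs are below) =====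
def Claim_equal_solution : Prop := ∀ (nums : List Int), Dom_solution nums → Spec_solution nums (solution nums)

-- ===== LEMMAS AND PROOFS =====

-- maximum multiplicity of any element of l (0 for the empty list)
def MC (l : List Int) : Int := l.foldl (fun a x => max a ((l.count x : Nat) : Int)) 0

theorem foldl_fixed {α β : Type} (l : List α) (f : β → α → β) (s : β)
    (h : ∀ a ∈ l, f s a = s) : l.foldl f s = s := by
  induction l with
  | nil => rfl
  | cons a t ih =>
      simp only [List.foldl_cons, h a (by simp)]
      exact ih (fun x hx => h x (by simp [hx]))

theorem foldl_max_le {β : Type} (l : List β) (f : β → Int) (i B : Int)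
    (hi : i ≤ B) (h : ∀ x ∈ l, f x ≤ B) :
    l.foldl (fun a x => max a (f x)) i ≤ B := by
  induction l generalizing i with
  | nil => simpa using hi
  | cons a t ih =>
      simp only [List.foldl_cons]
      exact ih _ (max_le hi (h a (by simp))) (fun x hx => h x (by simp [hx]))

theorem foldl_max_proj_mem {β : Type} (l : List β) (f : β → Int) (i : Int) :
    l.foldl (fun a x => max a (f x)) i = i ∨ ∃ x ∈ l, l.foldl (fun a x => max a (f x)) i = f x := by
  induction l generalizing i with
  | nil => left; rfl
  | cons a t ih =>
      simp only [List.foldl_cons]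
      rcases ih (max i (f a)) with h | ⟨x, hx, hfx⟩
      · rcases le_total i (f a) with hle | hle
        · right; exact ⟨a, by simp, by rw [h, max_eq_right hle]⟩
        · left; rw [h, max_eq_left hle]
      · right; exact ⟨x, by simp [hx], hfx⟩

theorem MC_nonneg (l : List Int) : 0 ≤ MC l :=
  (PySem.List.le_foldl_max_int l _ 0).1

theorem count_le_MC (l : List Int) (x : Int) (hx : x ∈ l) : ((l.count x : Nat) : Int) ≤ MC l :=
  (PySem.List.le_foldl_max_int l _ 0).2 x hx

theorem MC_mono_suffix (l l' : List Int) (h : l <:+ l') : MC l ≤ MC l' := by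
  refine foldl_max_le _ _ _ _ (MC_nonneg l') (fun x hx => ?_)
  calc ((l.count x : Nat) : Int) ≤ ((l'.count x : Nat) : Int) := by
        exact_mod_cast h.sublist.count_le x
    _ ≤ MC l' := count_le_MC l' x (h.sublist.mem hx)

theorem MC_pos (h : Int) (t : List Int) : 1 ≤ MC (h :: t) := by
  have h1 := count_le_MC (h :: t) h (by simp)
  have h2 : 0 < (h :: t).count h := List.count_pos_iff.2 (by simp)
  omega

theorem count_take_idxOf (x : Int) (xs : List Int) :
    (xs.take (List.idxOf x xs)).count x = 0 := by
  induction xs with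
  | nil => rfl
  | cons a t ih =>
      by_cases hax : a = x
      · subst hax; simp
      · simp [hax, ih]

-- the inner loop of func counts the occurrences of c in nums[i:]
theorem func_inner (xs : List Int) (c : Int) (i : Int) (h0 : 0 ≤ i) (h1 : i ≤ (xs.length : Int)) :
    (PySem.List.pyRange 0 ((xs.length : Int) - i)).foldl
      (fun nm j => if c == PySem.List.pyGetD xs (j + i) 0 then nm + 1 else nm) 1
    = 1 + (((xs.drop i.toNat).count c : Nat) : Int) := by
  set ys := xs.drop i.toNat with hys
  have hyl : ys.length = xs.length - i.toNat := by rw [hys, List.length_drop]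
  have hlen : (xs.length : Int) - i = (ys.length : Int) := by omega
  rw [hlen]
  have hcongr : ∀ (acc : Int), ∀ j ∈ PySem.List.pyRange 0 (ys.length : Int),
      (fun nm j => if c == PySem.List.pyGetD xs (j + i) 0 then nm + 1 else nm) acc j
      = (fun nm j => (fun nm x => if c == x then nm + 1 else nm) nm (PySem.List.pyGetD ys j 0)) acc j := by
    intro acc j hj
    have hj' := (PySem.List.mem_pyRange_one).1 hj
    have hji : j + i = (((j.toNat + i.toNat : Nat)) : Int) := by omega
    have hjn : j = ((j.toNat : Nat) : Int) := by omega
    have e1 : PySem.List.pyGetD xs (j + i) 0 = xs.getD (j.toNat + i.toNat) 0 := by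
      rw [hji, PySem.List.pyGetD_natCast]
    have e2 : PySem.List.pyGetD ys j 0 = ys.getD j.toNat 0 := by
      conv_lhs => rw [hjn]
      rw [PySem.List.pyGetD_natCast]
    have hg : ys.getD j.toNat 0 = xs.getD (j.toNat + i.toNat) 0 := by
      rw [List.getD_eq_getElem?_getD, List.getD_eq_getElem?_getD, hys, List.getElem?_drop,
        Nat.add_comm i.toNat j.toNat]
    simp only
    rw [e1, e2, hg]
  rw [PySem.List.foldl_congr_mem _ _ _ _ hcongr,
      PySem.List.foldl_pyRange_pyGetD' ys 0 (fun nm x => if c == x then nm + 1 else nm) 1 (le_refl 0)]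
  simp only [Int.toNat_zero, List.drop_zero]
  rw [PySem.List.foldl_count_if (fun x => c == x) ys (1 : Int)]
  have hc : List.countP (fun x => c == x) ys = List.count c ys :=
    List.countP_congr (fun x _ => by rw [Bool.beq_comm])
  rw [hc]

-- func computes 1 + (max multiplicity)
theorem func_eq (xs : List Int) : func xs = 1 + MC xs := by
  have hbody : ∀ (acc : Int), ∀ i ∈ PySem.List.pyRange 0 (xs.length : Int),
      (fun mx i =>
        let c := PySem.List.pyGetD xs i 0
        let nmax := (PySem.List.pyRange 0 ((xs.length : Int) - i)).foldl
          (fun nm j => if c == PySem.List.pyGetD xs (j + i) 0 then nm + 1 else nm) 1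
        if nmax > mx then nmax else mx) acc i
      = (fun mx i => max mx (1 + (((xs.drop i.toNat).count (PySem.List.pyGetD xs i 0) : Nat) : Int))) acc i := by
    intro acc i hi
    have hi' := (PySem.List.mem_pyRange_one).1 hi
    simp only
    rw [func_inner xs _ i hi'.1 (le_of_lt hi'.2)]
    split_ifs with hgt
    · exact (max_eq_right (le_of_lt hgt)).symm
    · exact (max_eq_left (not_lt.1 hgt)).symm
  unfold func
  rw [PySem.List.foldl_congr_mem _ _ _ _ hbody]
  apply le_antisymm
  · refine foldl_max_le _ _ _ _ (by have := MC_nonneg xs; omega) (fun i hi => ?_)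
    have hi' := (PySem.List.mem_pyRange_one).1 hi
    have hmem : PySem.List.pyGetD xs i 0 ∈ xs := by
      have hieq : i = ((i.toNat : Nat) : Int) := by omega
      rw [hieq, PySem.List.pyGetD_natCast]
      have hlt : i.toNat < xs.length := by omega
      rw [List.getD_eq_getElem _ _ hlt]
      exact List.getElem_mem hlt
    have h1 : (xs.drop i.toNat).count (PySem.List.pyGetD xs i 0) ≤ xs.count (PySem.List.pyGetD xs i 0) :=
      (List.drop_sublist _ _).count_le _
    have h2 := count_le_MC xs _ hmem
    omega
  · have hf : (1 : Int) ≤ (PySem.List.pyRange 0 (xs.length : Int)).foldl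
        (fun mx i => max mx (1 + (((xs.drop i.toNat).count (PySem.List.pyGetD xs i 0) : Nat) : Int))) 1 :=
      (PySem.List.le_foldl_max_int _ _ 1).1
    have hub : ∀ x ∈ xs, ((xs.count x : Nat) : Int) ≤ (PySem.List.pyRange 0 (xs.length : Int)).foldl
        (fun mx i => max mx (1 + (((xs.drop i.toNat).count (PySem.List.pyGetD xs i 0) : Nat) : Int))) 1 - 1 := by
      intro x hx
      have hidx : List.idxOf x xs < xs.length := List.idxOf_lt_length_of_mem hx
      have hmemr : ((List.idxOf x xs : Nat) : Int) ∈ PySem.List.pyRange 0 (xs.length : Int) := by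
        rw [PySem.List.mem_pyRange_one]; omega
      have hval := (PySem.List.le_foldl_max_int (PySem.List.pyRange 0 (xs.length : Int))
        (fun i => 1 + (((xs.drop i.toNat).count (PySem.List.pyGetD xs i 0) : Nat) : Int)) 1).2 _ hmemr
      simp only [Int.toNat_natCast, PySem.List.pyGetD_natCast] at hval
      rw [List.getD_eq_getElem _ _ hidx, List.getElem_idxOf hidx] at hval
      have hcnt : (xs.drop (List.idxOf x xs)).count x = xs.count x := by
        conv_rhs => rw [← List.take_append_drop (List.idxOf x xs) xs]
        rw [List.count_append, count_take_idxOf]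
        omega
      rw [hcnt] at hval
      omega
    have hMC := foldl_max_le xs (fun x => ((xs.count x : Nat) : Int)) 0 _ (by omega) hub
    have : MC xs ≤ _ := hMC
    omega

theorem MC_achieved (l : List Int) : MC l = 0 ∨ ∃ x ∈ l, MC l = ((l.count x : Nat) : Int) :=
  foldl_max_proj_mem l _ 0

-- max() over a list of nonnegative counts, characterized by its upper bound and attainment
theorem max?_map_eq (base : List Int) (f : Int → Nat) (M : Int) (hne : base ≠ [])
    (hub : ∀ k ∈ base, ((f k : Nat) : Int) ≤ M)
    (hach : M = 0 ∨ ∃ k ∈ base, ((f k : Nat) : Int) = M) :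
    PySem.List.max? (base.map (fun k => ((f k : Nat) : Int))) (fun v => v) = some M := by
  cases hmv : PySem.List.max? (base.map (fun k => ((f k : Nat) : Int))) (fun v => v) with
  | none =>
      have := (PySem.List.max?_eq_none_iff _ _).1 hmv
      simp only [List.map_eq_nil_iff] at this
      exact absurd this hne
  | some mv =>
      congr 1
      have hmem := PySem.List.max?_mem hmv
      have hmax := PySem.List.max?_isMax hmv
      obtain ⟨k, hk, hkv⟩ := List.mem_map.1 hmem
      apply le_antisymm
      · rw [← hkv]; exact hub k hk
      · rcases hach with h0 | ⟨k', hk', hkv'⟩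
        · rw [h0, ← hkv]; exact Int.natCast_nonneg _
        · rw [← hkv']
          exact hmax _ (List.mem_map_of_mem hk')

-- ===== the first loop of A always ends at the full prefix =====
theorem loop1_eq (xs : List Int) (hne : xs ≠ []) (init : Int) :
    (PySem.List.pyRange 0 (xs.length : Int)).foldl (fun tmin i =>
      let t := PySem.List.slice xs (some 0) (some (i + 1))
      if func t == func xs then (t.length : Int) else tmin) init
    = (xs.length : Int) := by
  have hlen0 : xs.length ≠ 0 := by simpa using hne
  have h0 : (0 : Int) ≤ (xs.length : Int) - 1 := by omega
  have hsplit := PySem.List.pyRange_one_succ_right (a := (0 : Int)) (b := (xs.length : Int) - 1) h0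
  rw [show ((xs.length : Int) - 1) + 1 = (xs.length : Int) by ring] at hsplit
  rw [hsplit, List.foldl_append, List.foldl_cons, List.foldl_nil]
  have hslice : PySem.List.slice xs (some 0) (some (((xs.length : Int) - 1) + 1)) = xs := by
    rw [show ((xs.length : Int) - 1) + 1 = ((xs.length : Nat) : Int) by ring]
    rw [PySem.List.slice_zero_start, PySem.List.slice_to_natCast, List.take_length]
  simp

-- ===== the second loop of A: keeps n unless the 1-shorter suffix has the same max multiplicity =====
theorem loop2_eq (h : Int) (t : List Int) :
    (PySem.List.pyRange 0 (((h :: t).length : Int))).foldl (fun tmin i =>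
      let s := PySem.List.slice (h :: t) (some (-i)) none
      if func s == func (h :: t) then (s.length : Int) else tmin) (((h :: t).length : Int))
    = if MC t = MC (h :: t) then (t.length : Int) else (((h :: t).length : Int)) := by
  by_cases hC : MC t = MC (h :: t)
  · rw [if_pos hC]
    have ht : t ≠ [] := by
      intro hnil
      subst hnil
      have h1 := MC_pos h []
      have h2 : MC ([] : List Int) = 0 := rfl
      omega
    have hlt : 0 < t.length := List.length_pos_iff.2 ht
    have hn : (h :: t).length = t.length + 1 := rfl
    have h0 : (0 : Int) ≤ (((h :: t).length : Int)) - 1 := by omega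
    have hsplit := PySem.List.pyRange_one_succ_right (a := (0 : Int)) (b := (((h :: t).length : Int)) - 1) h0
    rw [show ((((h :: t).length : Int)) - 1) + 1 = (((h :: t).length : Int)) by ring] at hsplit
    rw [hsplit, List.foldl_append, List.foldl_cons, List.foldl_nil]
    have hslice : PySem.List.slice (h :: t) (some (-((((h :: t).length : Int)) - 1))) none = t := by
      rw [show (((h :: t).length : Int)) - 1 = ((t.length : Nat) : Int) by rw [hn]; push_cast; ring]
      rw [PySem.List.slice_from_neg_natCast _ _ hlt, hn]
      have hd : t.length + 1 - t.length = 1 := by omega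
      rw [hd, List.drop_one, List.tail_cons]
    simp only [hslice]
    rw [if_pos (by rw [func_eq, func_eq, hC]; exact beq_self_eq_true _)]
  · rw [if_neg hC]
    have hle := MC_mono_suffix t (h :: t) ⟨[h], rfl⟩
    have hlt : MC t < MC (h :: t) := lt_of_le_of_ne hle hC
    apply foldl_fixed
    intro i hi
    have hi' := (PySem.List.mem_pyRange_one).1 hi
    by_cases hiz : i = 0
    · subst hiz
      simp only [neg_zero]
      have hslice : PySem.List.slice (h :: t) (some 0) none = h :: t := by
        rw [PySem.List.slice_zero_start, PySem.List.slice_none_none]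
      simp
    · have hip : 1 ≤ i := by omega
      have hitn : 0 < i.toNat := by omega
      have hieq : i = ((i.toNat : Nat) : Int) := by omega
      have hslice : PySem.List.slice (h :: t) (some (-i)) none =
          List.drop ((h :: t).length - i.toNat) (h :: t) := by
        conv_lhs => rw [hieq]
        rw [PySem.List.slice_from_neg_natCast _ _ hitn]
      have hd1 : (h :: t).length - i.toNat = ((h :: t).length - i.toNat - 1) + 1 := by
        have : i.toNat < (h :: t).length := by omega
        omega
      have hsuffix : List.drop ((h :: t).length - i.toNat) (h :: t) <:+ t := by
        rw [hd1, List.drop_succ_cons]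
        exact List.drop_suffix _ _
      have hMCs : MC (List.drop ((h :: t).length - i.toNat) (h :: t)) < MC (h :: t) :=
        lt_of_le_of_lt (MC_mono_suffix _ _ hsuffix) hlt
      have hfne : func (List.drop ((h :: t).length - i.toNat) (h :: t)) ≠ func (h :: t) := by
        rw [func_eq, func_eq]
        omega
      simp only [hslice]
      rw [if_neg (by simpa using hfne)]

-- ===== A computes the closed form =====
theorem solution_eq (h : Int) (t : List Int) :
    solution (h :: t) =
      if MC t = MC (h :: t) then (t.length : Int) else (((h :: t).length : Int)) := by
  unfold solution
  simp only
  rw [loop1_eq (h :: t) (by simp) _]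
  rw [if_neg (lt_irrefl _)]
  rw [loop2_eq h t]
  by_cases hC : MC t = MC (h :: t)
  · rw [if_pos hC, if_pos (show ((t.length : Nat) : Int) < (((h :: t).length : Nat) : Int) by
      push_cast [List.length_cons]; omega)]
  · rw [if_neg hC, if_neg (lt_irrefl _)]

-- ===== B computes the same closed form =====
theorem solution_alt_eq (h : Int) (t : List Int) :
    solution_alt (h :: t) =
      if MC t = MC (h :: t) then (t.length : Int) else (((h :: t).length : Int)) := by
  have hmem : h ∈ h :: t := by simp
  have hbase_ne : PySem.Set.ofList (h :: t) ≠ [] :=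
    List.ne_nil_of_mem ((PySem.Set.mem_ofList _ _).2 hmem)
  -- max of the counter's values is the max multiplicity of the whole list
  have hv1 : (PySem.Dict.counter (h :: t)).values
      = (PySem.Set.ofList (h :: t)).map (fun k => (((h :: t).count k : Nat) : Int)) := by
    rw [PySem.Dict.values_eq_map_keys _ (PySem.Dict.nodup_keys_counter _) 0, PySem.Dict.keys_counter]
    exact List.map_congr_left (fun k _ => PySem.Dict.getD_counter _ _)
  have hm1 : (PySem.List.max? (PySem.Dict.counter (h :: t)).values (fun v => v)).getD 0
      = MC (h :: t) := by
    rw [hv1]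
    rw [max?_map_eq _ _ (MC (h :: t)) hbase_ne
      (fun k hk => count_le_MC _ _ ((PySem.Set.mem_ofList _ _).1 hk))
      (by
        rcases MC_achieved (h :: t) with h0 | ⟨x, hx, hxv⟩
        · exact Or.inl h0
        · exact Or.inr ⟨x, (PySem.Set.mem_ofList _ _).2 hx, hxv.symm⟩)]
    rfl
  -- max of the decremented counter's values is the max multiplicity of the tail
  have hcont : (PySem.Dict.counter (h :: t)).contains h = true := by
    rw [PySem.Dict.contains_counter]
    simp
  have hkeys2 : ((PySem.Dict.counter (h :: t)).insert h
      ((PySem.Dict.counter (h :: t)).getD h 0 - 1)).keys = PySem.Set.ofList (h :: t) := by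
    rw [PySem.Dict.keys_insert_of_contains _ _ hcont, PySem.Dict.keys_counter]
  have hv2 : ((PySem.Dict.counter (h :: t)).insert h
      ((PySem.Dict.counter (h :: t)).getD h 0 - 1)).values
      = (PySem.Set.ofList (h :: t)).map (fun k => ((t.count k : Nat) : Int)) := by
    rw [PySem.Dict.values_eq_map_keys _ (by rw [hkeys2]; exact PySem.Set.nodup_ofList _) 0, hkeys2]
    refine List.map_congr_left (fun k hk => ?_)
    by_cases hkh : k = h
    · subst hkh
      rw [PySem.Dict.getD_insert_self, PySem.Dict.getD_counter]
      simp [List.count_cons_self]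
    · rw [PySem.Dict.getD_insert_of_ne _ _ _ hkh, PySem.Dict.getD_counter]
      simp [Ne.symm hkh]
  have hm2 : (PySem.List.max? ((PySem.Dict.counter (h :: t)).insert h
      ((PySem.Dict.counter (h :: t)).getD h 0 - 1)).values (fun v => v)).getD 0 = MC t := by
    rw [hv2]
    rw [max?_map_eq _ _ (MC t) hbase_ne
      (fun k hk => by
        by_cases hkt : k ∈ t
        · exact count_le_MC t k hkt
        · rw [List.count_eq_zero.2 hkt]
          simpa using MC_nonneg t)
      (by
        rcases MC_achieved t with h0 | ⟨x, hx, hxv⟩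
        · exact Or.inl h0
        · exact Or.inr ⟨x, (PySem.Set.mem_ofList _ _).2 (by simp [hx]), hxv.symm⟩)]
    rfl
  -- reduce B's body to the counter and the two maxima
  have hh0 : PySem.List.pyGetD (h :: t) 0 0 = h := by simp [pysem]
  have key : ∀ d : PySem.Dict Int Int, d = PySem.Dict.counter (h :: t) →
      (if (PySem.List.max? (d.insert (PySem.List.pyGetD (h :: t) 0 0)
              (d.getD (PySem.List.pyGetD (h :: t) 0 0) 0 - 1)).values (fun v => v)).getD 0
          == (PySem.List.max? d.values (fun v => v)).getD 0
       then (((h :: t).length : Nat) : Int) - 1 else (((h :: t).length : Nat) : Int))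
      = if MC t = MC (h :: t) then (t.length : Int) else (((h :: t).length : Int)) := by
    intro d hd
    subst hd
    rw [hh0, hm1, hm2]
    by_cases hC : MC t = MC (h :: t)
    · rw [if_pos (by rw [hC]; exact beq_self_eq_true _), if_pos hC]
      push_cast [List.length_cons]
      ring
    · rw [if_neg (by simpa using hC), if_neg hC]
  unfold solution_alt
  rw [if_neg (by simp)]
  exact key _ (PySem.Dict.foldl_insert_getD_add_one_eq_counter (h :: t))

-- ===== VERDICT (by name: the statement is the Claim_ definition above) =====
theorem solution_spec : Claim_equal_solution := by
  intro nums _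
  unfold Spec_solution
  cases nums with
  | nil => decide
  | cons h t => rw [solution_eq, solution_alt_eq]
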